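-- pv_equiv track=rewrite | github.com/JohnTH0/algorithm | python/algorithm/programmers/lv1/claw_machine.py | solution
-- ===== SOURCE A (Python) =====
-- def solution(board:list, moves:list):
--     bucket = []
--     count = 0
--     board_col_list = [list(i) for i in zip(*board)]
--
--     def target_doll_check(line):
--         target_line = board_col_list[line-1]
--         target_doll = next(filter(lambda x: x != 0, target_line),0)
--         if target_doll == 0:
--             return 0
--         target_doll_index = target_line.index(target_doll)
--         target_line[target_doll_index] = 0
--
--         return target_doll
--
--     for line in moves:
--         target_doll = target_doll_check(line)
--         if target_doll == 0:
--             continue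
--
--         bucket.append(target_doll)
--
--         if len(bucket) >= 2:
--             if bucket[-2] == bucket[-1]:
--                 count +=1
--                 del bucket[-2:]
--     return count * 2
-- ===== SOURCE B (Python) =====
-- def solution(board: list, moves: list):
--     # Two staged passes: (1) extract the sequence of picked dolls by popping
--     # per-column stacks (topmost doll at the stack's end), (2) reduce that
--     # sequence with a cancelling stack; the answer is the number of removed
--     # dolls, i.e. len(picks) - len(stack).
--     lanes = [[x for x in reversed(col) if x] for col in zip(*board)]
--     picks = [lanes[m - 1].pop() for m in moves if lanes[m - 1]]
--     stack = []
--     for d in picks: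
--         if stack and stack[-1] == d:
--             stack.pop()
--         else:
--             stack.append(d)
--     return len(picks) - len(stack)
-- ===== Notes on version B (the rewrite author's own statement) =====
-- stated objective: faster
-- what changed: B splits the work into two staged passes: it first builds per-column stacks of nonzero dolls once and extracts the whole pick sequence with O(1) pops, then reduces that sequence with a cancelling stack and returns len(picks) - len(stack), replacing A's single interleaved loop that rescans the mutated transpose per move (first nonzero, list.index, write 0) and maintains an explicit pair counter with del bucket[-2:].
import Mathlib
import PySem

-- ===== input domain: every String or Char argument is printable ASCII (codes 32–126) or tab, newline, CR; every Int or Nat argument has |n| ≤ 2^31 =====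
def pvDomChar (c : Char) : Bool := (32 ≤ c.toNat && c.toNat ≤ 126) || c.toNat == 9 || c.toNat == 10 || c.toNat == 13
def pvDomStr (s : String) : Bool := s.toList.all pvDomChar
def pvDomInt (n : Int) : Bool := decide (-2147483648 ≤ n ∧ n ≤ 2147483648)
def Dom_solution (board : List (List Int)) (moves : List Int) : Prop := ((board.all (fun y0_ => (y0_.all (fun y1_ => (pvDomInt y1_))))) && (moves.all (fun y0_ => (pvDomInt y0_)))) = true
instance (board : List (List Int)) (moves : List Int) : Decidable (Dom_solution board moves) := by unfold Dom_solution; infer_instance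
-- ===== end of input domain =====

-- B replaces A's single interleaved loop (per-move rescan of the mutated transpose plus an
-- explicit pair counter) by two staged passes: extract the pick sequence from per-column
-- stacks, then reduce it with a cancelling stack and return len(picks) - len(stack).

-- zip(*board): column j = j-th entry of every row, for j < the minimum row length.
-- row.getD j 0 is exact here: j < min row length ≤ every row's length, so the default 0 is never used.
def pyZipT (board : List (List Int)) : List (List Int) :=
  (List.range ((board.map List.length).min?.getD 0)).map (fun j => board.map (fun row => row.getD j 0))

-- ===== PORT A =====
-- one iteration of A's `for line in moves` loop (target_doll_check inlined, as A mutates board_col_list in place)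
def stepA (cols : List (List Int)) (bucket : List Int) (count : Int) (m : Int) : List (List Int) × List Int × Int :=
  match PySem.List.pyGet? cols (m - 1) with
  | none => (cols, bucket, count)   -- Python raises IndexError here; excluded by Pre_solution
  | some line =>
    match line.find? (fun x => x ≠ 0) with
    | none => (cols, bucket, count)   -- next(filter(...), 0) == 0: continue
    | some d =>
      let i := (PySem.List.index? line d).getD 0   -- target_line.index(target_doll); d ∈ line so never none
      let cols' := PySem.List.pySetD cols (m - 1) (line.set i 0)   -- target_line[i] = 0 (in-place alias)
      let bucket' := bucket ++ [d]
      if 2 ≤ bucket'.length ∧ PySem.List.pyGetD bucket' (-2) 0 = PySem.List.pyGetD bucket' (-1) 0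
      then (cols', PySem.List.slice bucket' none (some (-2)), count + 1)   -- del bucket[-2:]
      else (cols', bucket', count)

def solution (board : List (List Int)) (moves : List Int) : Int :=
  let cols := pyZipT board
  let s := moves.foldl (fun s m => stepA s.1 s.2.1 s.2.2 m) (cols, ([] : List Int), (0 : Int))
  s.2.2 * 2

-- ===== PORT B =====
-- [x for x in reversed(col) if x]: nonzero entries bottom-up, topmost doll at the end
def laneOf (col : List Int) : List Int := col.reverse.filter (fun x => x ≠ 0)

-- stage 1: [lanes[m-1].pop() for m in moves if lanes[m-1]] — the sequence of picked dolls
def picksOf : List (List Int) → List Int → List Int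
  | _, [] => []
  | lanes, m :: ms =>
    match PySem.List.pyGet? lanes (m - 1) with
    | none => picksOf lanes ms   -- Python raises IndexError here; excluded by Pre_solution
    | some lane =>
      if lane.isEmpty then picksOf lanes ms
      else lane.getLast?.getD 0 :: picksOf (PySem.List.pySetD lanes (m - 1) lane.dropLast) ms

-- stage 2: the cancelling-stack reduction of the pick sequence
def reduceStack : List Int → List Int → List Int
  | stack, [] => stack
  | stack, d :: ds =>
    if stack.getLast? = some d then reduceStack stack.dropLast ds
    else reduceStack (stack ++ [d]) ds

def solution_alt (board : List (List Int)) (moves : List Int) : Int :=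
  let picks := picksOf ((pyZipT board).map laneOf) moves
  let stack := reduceStack [] picks
  (picks.length : Int) - (stack.length : Int)

-- ===== PRECONDITION & SPEC =====
-- A raises IndexError when a move indexes outside the column list (of length = min row length,
-- zip truncates); every in-range move, including Python's negative wraparound, is admitted.
def Pre_solution (board : List (List Int)) (moves : List Int) : Prop :=
  ∀ m ∈ moves, PySem.Raise.InRange ((board.map List.length).min?.getD 0) (m - 1)
instance (board : List (List Int)) (moves : List Int) : Decidable (Pre_solution board moves) := by
  unfold Pre_solution PySem.Raise.InRange; infer_instance

def pvWitness_solution : List (List Int) × List Int := ([[0, 0, 1], [2, 1, 0], [2, 3, 3]], [1, 3, 3, 2, 2, 1])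

def Spec_solution (board : List (List Int)) (moves : List Int) (out : Int) : Prop := out = solution_alt board moves
instance (board : List (List Int)) (moves : List Int) (out : Int) : Decidable (Spec_solution board moves out) := by unfold Spec_solution; infer_instance

-- ===== CLAIM (what is proved, stated in full; the proofs are below) =====
def Claim_equal_solution : Prop := ∀ (board : List (List Int)) (moves : List Int), Dom_solution board moves → Pre_solution board moves → Spec_solution board moves (solution board moves)

-- ===== LEMMAS AND PROOFS =====

-- proof-only abbreviation for A's loop
def foldA (moves : List Int) (cols : List (List Int)) (bucket : List Int) (count : Int) :
    List (List Int) × List Int × Int :=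
  moves.foldl (fun s m => stepA s.1 s.2.1 s.2.2 m) (cols, bucket, count)

lemma pyGet?_map {α β : Type} (f : α → β) (xs : List α) (i : Int) :
    PySem.List.pyGet? (xs.map f) i = (PySem.List.pyGet? xs i).map f := by
  unfold PySem.List.pyGet?
  rw [List.length_map]
  cases h : PySem.List.pyIdx? xs.length i <;> simp_all

lemma pySetD_map {α β : Type} (f : α → β) (xs : List α) (i : Int) (v : α) :
    PySem.List.pySetD (xs.map f) i (f v) = (PySem.List.pySetD xs i v).map f := by
  unfold PySem.List.pySetD PySem.List.pySet?
  rw [List.length_map]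
  cases h : PySem.List.pyIdx? xs.length i <;> simp_all [List.map_set]

-- removing the first nonzero entry of a column = removing the head of its nonzero filter
lemma filter_step (line : List Int) :
    match line.find? (fun x => x ≠ 0) with
    | none => line.filter (fun x => x ≠ 0) = []
    | some d =>
        line.filter (fun x => x ≠ 0) =
          d :: (line.set ((PySem.List.index? line d).getD 0) 0).filter (fun x => x ≠ 0) := by
  induction line with
  | nil => simp
  | cons x xs ih =>
    by_cases hx : x = 0
    · subst hx
      have hfind : List.find? (fun x : Int => x ≠ 0) (0 :: xs) = List.find? (fun x : Int => x ≠ 0) xs := by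
        simp
      rw [hfind]
      cases hf : List.find? (fun x : Int => x ≠ 0) xs with
      | none =>
        simp only [hf] at ih ⊢
        simpa using ih
      | some d =>
        have hd : d ≠ 0 := by simpa using List.find?_some hf
        simp only [hf] at ih ⊢
        obtain ⟨k, hk⟩ := Option.isSome_iff_exists.1 ((PySem.List.index?_isSome_iff xs d).2
          (List.mem_of_find?_eq_some hf))
        rw [PySem.List.index?_cons_of_ne xs (fun h : (0 : Int) = d => hd h.symm), hk]
        rw [hk] at ih
        simp only [Option.map_some, Option.getD_some, List.set_cons_succ]
        rw [List.filter_cons, List.filter_cons]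
        simpa using ih
    · have hpx : decide (x ≠ 0) = true := by simpa using hx
      rw [List.find?_cons]
      simp only [hpx]
      rw [PySem.List.index?_cons_self]
      simp only [Option.getD_some, List.set_cons_zero]
      rw [List.filter_cons, List.filter_cons]
      simp [hx]

-- A's append-then-cancel test on the bucket fires exactly when the bucket's top equals the doll
lemma bucket_cond (b : List Int) (d : Int) :
    (2 ≤ (b ++ [d]).length ∧
      PySem.List.pyGetD (b ++ [d]) (-2) 0 = PySem.List.pyGetD (b ++ [d]) (-1) 0)
    ↔ b.getLast? = some d := by
  induction b using List.reverseRecOn with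
  | nil => simp [PySem.List.pyGetD, PySem.List.pyGet?, PySem.List.pyIdx?]
  | append_singleton l a _ =>
    have h2 : PySem.List.pyGetD ((l ++ [a]) ++ [d]) (-2) 0 = a := by
      rw [PySem.List.pyGetD_neg_ofNat ((l ++ [a]) ++ [d]) 2 0 (by omega) (by simp)]
      simp
    have h1 : PySem.List.pyGetD ((l ++ [a]) ++ [d]) (-1) 0 = d :=
      PySem.List.pyGetD_neg_one_append_singleton _ _ _
    rw [h2, h1]
    simp

-- del bucket[-2:] after the append leaves the old bucket minus its top
lemma bucket_del (b : List Int) (d : Int) (hb : b ≠ []) :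
    PySem.List.slice (b ++ [d]) none (some (-2)) = b.dropLast := by
  induction b using List.reverseRecOn with
  | nil => exact absurd rfl hb
  | append_singleton l a _ =>
    rw [PySem.List.slice_to_neg_ofNat _ 2 (by omega)]
    simp

-- the invariant: A's loop state vs B's staged picks
lemma fold_inv (moves : List Int) (cols : List (List Int)) (bucket : List Int) (count : Int) :
    (foldA moves cols bucket count).2.1 =
      reduceStack bucket (picksOf (cols.map laneOf) moves) ∧
    2 * (foldA moves cols bucket count).2.2 + ((foldA moves cols bucket count).2.1.length : Int)
      = 2 * count + (bucket.length : Int) + ((picksOf (cols.map laneOf) moves).length : Int) := by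
  induction moves generalizing cols bucket count with
  | nil => simp [foldA, picksOf, reduceStack]
  | cons m ms ih =>
    have hstep : foldA (m :: ms) cols bucket count =
        foldA ms (stepA cols bucket count m).1 (stepA cols bucket count m).2.1
          (stepA cols bucket count m).2.2 := rfl
    rw [hstep]
    unfold stepA
    rw [show picksOf (cols.map laneOf) (m :: ms) =
        (match PySem.List.pyGet? (cols.map laneOf) (m - 1) with
         | none => picksOf (cols.map laneOf) ms
         | some lane =>
           if lane.isEmpty then picksOf (cols.map laneOf) ms
           else lane.getLast?.getD 0 ::
             picksOf (PySem.List.pySetD (cols.map laneOf) (m - 1) lane.dropLast) ms) from rfl]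
    rw [pyGet?_map]
    cases hg : PySem.List.pyGet? cols (m - 1) with
    | none => simpa using ih cols bucket count
    | some line =>
      simp only [Option.map_some]
      have hlane : laneOf line = (line.filter (fun x => x ≠ 0)).reverse := by
        unfold laneOf
        rw [List.filter_reverse]
      have hfs := filter_step line
      cases hf : line.find? (fun x => x ≠ 0) with
      | none =>
        simp only [hf] at hfs
        have hempty : (laneOf line).isEmpty = true := by
          rw [hlane, hfs]; rfl
        simpa [hempty] using ih cols bucket count
      | some d =>
        simp only [hf] at hfs
        have hnotempty : (laneOf line).isEmpty = false := by
          rw [hlane, hfs]; simp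
        have hlast : (laneOf line).getLast? = some d := by
          rw [hlane, hfs, List.getLast?_reverse]; rfl
        have hdrop : (laneOf line).dropLast =
            laneOf (line.set ((PySem.List.index? line d).getD 0) 0) := by
          rw [hlane, hfs, List.reverse_cons, List.dropLast_concat]
          unfold laneOf
          rw [List.filter_reverse]
        simp only [hnotempty, hlast, Option.getD_some, hdrop, pySetD_map, Bool.false_eq_true,
          if_false]
        by_cases hbd : bucket.getLast? = some d
        · have hbne : bucket ≠ [] := by intro h; subst h; simp at hbd
          have hcond := (bucket_cond bucket d).2 hbd
          have hlen1 : 1 ≤ bucket.length := List.length_pos_iff.2 hbne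
          have hred : reduceStack bucket
              (d :: picksOf ((PySem.List.pySetD cols (m - 1)
                (line.set ((PySem.List.index? line d).getD 0) 0)).map laneOf) ms) =
              reduceStack bucket.dropLast
              (picksOf ((PySem.List.pySetD cols (m - 1)
                (line.set ((PySem.List.index? line d).getD 0) 0)).map laneOf) ms) := by
            rw [reduceStack, if_pos hbd]
          simp only [hcond.1, hcond.2, and_self, if_true, bucket_del bucket d hbne, hred]
          obtain ⟨ih1, ih2⟩ := ih (PySem.List.pySetD cols (m - 1)
            (line.set ((PySem.List.index? line d).getD 0) 0)) bucket.dropLast (count + 1)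
          refine ⟨ih1, ?_⟩
          rw [ih2]
          have : bucket.dropLast.length = bucket.length - 1 := by simp
          rw [this]
          simp only [List.length_cons]
          push_cast [Nat.cast_sub hlen1]
          omega
        · have hcond2 : ¬(2 ≤ (bucket ++ [d]).length ∧
              PySem.List.pyGetD (bucket ++ [d]) (-2) 0 = PySem.List.pyGetD (bucket ++ [d]) (-1) 0) := by
            intro h; exact hbd ((bucket_cond bucket d).1 h)
          have hred : reduceStack bucket
              (d :: picksOf ((PySem.List.pySetD cols (m - 1)
                (line.set ((PySem.List.index? line d).getD 0) 0)).map laneOf) ms) =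
              reduceStack (bucket ++ [d])
              (picksOf ((PySem.List.pySetD cols (m - 1)
                (line.set ((PySem.List.index? line d).getD 0) 0)).map laneOf) ms) := by
            rw [reduceStack, if_neg hbd]
          rw [if_neg hcond2, hred]
          obtain ⟨ih1, ih2⟩ := ih (PySem.List.pySetD cols (m - 1)
            (line.set ((PySem.List.index? line d).getD 0) 0)) (bucket ++ [d]) count
          refine ⟨ih1, ?_⟩
          rw [ih2]
          push_cast [List.length_append, List.length_cons, List.length_nil]
          omega

-- ===== VERDICT (by name: the statement is the Claim_ definition above) =====
theorem solution_spec : Claim_equal_solution := by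
  intro board moves _ _
  unfold Spec_solution
  show solution board moves = solution_alt board moves
  obtain ⟨h1, h2⟩ := fold_inv moves (pyZipT board) [] 0
  unfold foldA at h1 h2
  simp only [solution, solution_alt, h1, List.length_nil, Nat.cast_zero] at h2 ⊢
  omega
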